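-- pv_equiv track=rewrite | github.com/Kirill8769/bank_widget | dop_tasks/dop_integer.py | get_max_integer
-- ===== SOURCE A (Python) =====
-- def get_max_integer(int_list: list[int]) -> int:
--     """
--     Находит произведение двух наибольших целых чисел в списке.
--     Если в списке менее двух элементов, возвращается 0.
--
--     :param int_list (list[int]): Список целых чисел
--     :return (int): Произведение двух наибольших целых чисел в списке.
--     """
--     if len(int_list) < 2:
--         return 0
--
--     result = 1
--     abs_int_list = sorted([abs(number) for number in int_list])
--     for number in abs_int_list[-2:]:
--         result *= number
--     return result
-- ===== SOURCE B (Python) =====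
-- def get_max_integer(int_list: list[int]) -> int:
--     """Single pass: track the two largest absolute values, multiply them."""
--     if len(int_list) < 2:
--         return 0
--     m1 = m2 = 0
--     for number in int_list:
--         a = abs(number)
--         if a >= m1:
--             m1, m2 = a, m1
--         elif a > m2:
--             m2 = a
--     return m1 * m2
-- ===== Notes on version B (the rewrite author's own statement) =====
-- stated objective: faster
-- what changed: Replaced sorting the absolute values and multiplying the last two of the sorted list with a single linear pass that tracks the two largest absolute values.
import Mathlib
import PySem

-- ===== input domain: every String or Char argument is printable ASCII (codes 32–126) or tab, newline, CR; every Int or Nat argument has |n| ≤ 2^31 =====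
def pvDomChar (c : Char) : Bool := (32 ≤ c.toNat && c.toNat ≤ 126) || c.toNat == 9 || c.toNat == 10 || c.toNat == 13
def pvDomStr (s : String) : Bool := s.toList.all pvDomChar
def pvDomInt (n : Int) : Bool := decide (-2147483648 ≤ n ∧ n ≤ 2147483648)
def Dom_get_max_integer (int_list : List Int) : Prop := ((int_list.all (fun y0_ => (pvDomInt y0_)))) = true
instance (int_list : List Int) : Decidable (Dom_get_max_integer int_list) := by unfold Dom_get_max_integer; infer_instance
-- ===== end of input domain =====

-- B replaces A's sort-then-slice with a single pass tracking the two largest absolute values (O(n) vs O(n log n)).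

-- ===== PORT A =====
def get_max_integer (int_list : List Int) : Int :=
  if int_list.length < 2 then 0
  else
    let abs_int_list := PySem.List.sorted (int_list.map (fun number => |number|)) (fun x => x) false
    (PySem.List.slice abs_int_list (some (-2)) none).foldl (fun result number => result * number) 1

-- ===== PORT B =====
-- the single-pass update: (m1, m2) are the two largest absolute values seen so far
def pvStep (s : Int × Int) (number : Int) : Int × Int :=
  let a := |number|
  if a ≥ s.1 then (a, s.1) else if a > s.2 then (s.1, a) else s

def get_max_integer_alt (int_list : List Int) : Int :=
  if int_list.length < 2 then 0
  else
    let s := int_list.foldl pvStep (0, 0)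
    s.1 * s.2

-- ===== PRECONDITION & SPEC =====
def Spec_get_max_integer (int_list : List Int) (out : Int) : Prop := out = get_max_integer_alt int_list
instance (int_list : List Int) (out : Int) : Decidable (Spec_get_max_integer int_list out) := by unfold Spec_get_max_integer; infer_instance

-- ===== CLAIM (what is proved, stated in full; the proofs are below) =====
def Claim_equal_get_max_integer : Prop := ∀ (int_list : List Int), Dom_get_max_integer int_list → Spec_get_max_integer int_list (get_max_integer int_list)

-- ===== LEMMAS AND PROOFS =====

-- the bare step on absolute values (pvStep after pulling |·| through foldl_map)
def pvStep' (s : Int × Int) (a : Int) : Int × Int :=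
  if a ≥ s.1 then (a, s.1) else if a > s.2 then (s.1, a) else s

theorem pvStep'_comm (z : Int × Int) (x y : Int) :
    pvStep' (pvStep' z x) y = pvStep' (pvStep' z y) x := by
  rcases z with ⟨m1, m2⟩
  simp only [pvStep']
  split_ifs <;> simp_all <;> omega

-- folding pvStep' over an ascending list of nonnegatives yields (last, second-to-last), padded with 0
theorem foldl_pvStep'_sorted (ys : List Int) (hs : ys.Pairwise (· ≤ ·))
    (hn : ∀ x ∈ ys, 0 ≤ x) :
    ys.foldl pvStep' (0, 0) = (ys.getLastD 0, ys.dropLast.getLastD 0) := by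
  induction ys using List.reverseRecOn with
  | nil => simp
  | append_singleton zs a ih =>
    have hp : zs.Pairwise (· ≤ ·) := (List.pairwise_append.mp hs).1
    have hge : ∀ x ∈ zs, x ≤ a := by
      intro x hx
      exact (List.pairwise_append.mp hs).2.2 x hx a (List.mem_singleton_self a)
    have hn' : ∀ x ∈ zs, 0 ≤ x := fun x hx => hn x (List.mem_append_left _ hx)
    have ha : 0 ≤ a := hn a (List.mem_append_right _ (List.mem_singleton_self a))
    have hle : zs.getLastD 0 ≤ a := by
      cases zs using List.reverseRecOn with
      | nil => simpa using ha
      | append_singleton ws b _ =>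
        have := hge b (List.mem_append_right _ (List.mem_singleton_self b))
        simpa using this
    rw [List.foldl_append, ih hp hn']
    simp only [List.foldl_cons, List.foldl_nil, pvStep']
    rw [if_pos hle]
    simp

theorem foldl_mul_pair (x y : Int) : List.foldl (fun result number => result * number) 1 [x, y] = x * y := by
  simp [List.foldl]

-- drop (n-2) of a list of length n ≥ 2 is the final two elements
theorem drop_pred_pred (ys : List Int) (h : 2 ≤ ys.length) :
    ys.drop (ys.length - 2) = [ys.dropLast.getLastD 0, ys.getLastD 0] := by
  induction ys using List.reverseRecOn with
  | nil => simp at h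
  | append_singleton zs a ih =>
    cases zs using List.reverseRecOn with
    | nil => simp at h
    | append_singleton ws b _ =>
      have hlen : (ws ++ [b] ++ [a]).length = ws.length + 2 := by simp
      rw [hlen]
      simp only [Nat.add_sub_cancel]
      rw [show ws ++ [b] ++ [a] = ws ++ ([b] ++ [a]) by simp]
      rw [List.drop_append_of_le_length (by simp)]
      simp

-- ===== VERDICT (by name: the statement is the Claim_ definition above) =====
theorem get_max_integer_spec : Claim_equal_get_max_integer := by
  intro l _
  unfold Spec_get_max_integer get_max_integer get_max_integer_alt
  by_cases hl : l.length < 2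
  · simp [hl]
  · simp only [hl, if_false]
    set ys := PySem.List.sorted (l.map (fun number => |number|)) (fun x => x) false with hys
    have hperm : ys.Perm (l.map (fun number => |number|)) := PySem.List.sorted_perm _ _ _
    have hlen : ys.length = l.length := by
      rw [hperm.length_eq, List.length_map]
    have h2 : 2 ≤ ys.length := by omega
    have hpw : ys.Pairwise (· ≤ ·) := by
      have := PySem.List.sorted_pairwise (l.map (fun number => |number|)) (fun x => x)
      simpa using this
    have hnn : ∀ x ∈ ys, 0 ≤ x := by
      intro x hx
      have := hperm.mem_iff.mp hx
      obtain ⟨n, _, rfl⟩ := List.mem_map.mp this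
      exact abs_nonneg n
    -- B's fold over l equals the fold of pvStep' over ys (map then permutation invariance)
    have hbfold : l.foldl pvStep (0, 0) = ys.foldl pvStep' (0, 0) := by
      have h1 : l.foldl pvStep (0, 0) = (l.map (fun number => |number|)).foldl pvStep' (0, 0) := by
        rw [List.foldl_map]
        rfl
      rw [h1]
      exact ((hperm.foldl_eq' (fun x _ y _ z => pvStep'_comm z x y)) (0, 0)).symm
    rw [hbfold, foldl_pvStep'_sorted ys hpw hnn]
    -- A's slice is the last two elements of ys
    rw [PySem.List.slice_from_neg_ofNat ys 2 (by omega)]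
    rw [drop_pred_pred ys h2, foldl_mul_pair]
    ring
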